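-- pv_equiv track=rewrite | github.com/justinlietz93/pAI_Lang_Compiler | decoder/nl_generator/parser.py | _split_conditional_block
-- ===== SOURCE A (Python) =====
-- def _split_conditional_block(block_content):
--     """
--     Split conditional block into true and false branches.
--
--     Args:
--         block_content (list): Lines in the conditional block.
--
--     Returns:
--         tuple: (true_branch_lines, false_branch_lines)
--     """
--     true_branch = []
--     false_branch = []
--
--     # Find the ELSE marker
--     in_true_branch = True
--     for line in block_content:
--         if line.strip().startswith('>>> ELSE'):
--             in_true_branch = False
--             continue
--
--         if in_true_branch:
--             true_branch.append(line)
--         else: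
--             false_branch.append(line)
--
--     return true_branch, false_branch
-- ===== SOURCE B (Python) =====
-- def _split_conditional_block(block_content):
--     """Locate-then-slice: find the first ELSE marker, slice around it,
--     and filter any further ELSE markers out of the false branch."""
--     is_else = lambda line: line.strip().startswith('>>> ELSE')
--     for i, line in enumerate(block_content):
--         if is_else(line):
--             return (block_content[:i],
--                     [l for l in block_content[i+1:] if not is_else(l)])
--     return list(block_content), []
-- ===== Notes on version B (the rewrite author's own statement) =====
-- stated objective: alternative
-- what changed: Replaces A's single stateful flag-pass with a locate-then-slice decomposition: find the index of the first ELSE marker, take the prefix as the true branch, and filter remaining ELSE markers out of the suffix as the false branch.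
import Mathlib
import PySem

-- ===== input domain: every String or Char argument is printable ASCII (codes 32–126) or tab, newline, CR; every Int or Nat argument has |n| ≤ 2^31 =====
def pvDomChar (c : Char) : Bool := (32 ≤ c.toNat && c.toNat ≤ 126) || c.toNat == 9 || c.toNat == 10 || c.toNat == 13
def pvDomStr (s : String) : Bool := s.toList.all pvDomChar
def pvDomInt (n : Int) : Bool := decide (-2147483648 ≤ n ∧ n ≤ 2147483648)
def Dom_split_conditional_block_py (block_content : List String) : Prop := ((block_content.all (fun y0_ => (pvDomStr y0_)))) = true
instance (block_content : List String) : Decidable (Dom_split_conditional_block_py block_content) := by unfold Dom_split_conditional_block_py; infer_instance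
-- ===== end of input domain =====

-- B replaces A's stateful flag-pass with a locate-then-slice/filter decomposition; same O(n) cost.
-- ===== PORT A =====
def pvIsElse (line : String) : Bool := PySem.Str.startswith (PySem.Str.strip line) ">>> ELSE"

-- the loop of A: state is the in_true_branch flag; branches appended in order
def pvGoA (lines : List String) (inTrue : Bool) : List String × List String :=
  match lines with
  | [] => ([], [])
  | l :: rest =>
    if pvIsElse l then pvGoA rest false
    else
      let (t, f) := pvGoA rest inTrue
      if inTrue then (l :: t, f) else (t, l :: f)

def split_conditional_block_py (block_content : List String) : List String × List String :=
  pvGoA block_content true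

-- ===== PORT B =====
def split_conditional_block_py_alt (block_content : List String) : List String × List String :=
  match List.findIdx? pvIsElse block_content with
  | none => (block_content, [])
  | some i => (block_content.take i, (block_content.drop (i+1)).filter (fun l => !pvIsElse l))

-- ===== PRECONDITION & SPEC =====
def Spec_split_conditional_block_py (block_content : List String) (out : List String × List String) : Prop := out = split_conditional_block_py_alt block_content
instance (block_content : List String) (out : List String × List String) : Decidable (Spec_split_conditional_block_py block_content out) := by unfold Spec_split_conditional_block_py; infer_instance

-- ===== CLAIM (what is proved, stated in full; the proofs are below) =====
def Claim_equal_split_conditional_block_py : Prop := ∀ (block_content : List String), Dom_split_conditional_block_py block_content → Spec_split_conditional_block_py block_content (split_conditional_block_py block_content)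

-- ===== LEMMAS AND PROOFS =====

-- once the flag is false, everything non-ELSE goes to the false branch
lemma pvGoA_false (lines : List String) :
    pvGoA lines false = ([], lines.filter (fun l => !pvIsElse l)) := by
  induction lines with
  | nil => rfl
  | cons l rest ih =>
    by_cases h : pvIsElse l = true <;>
      simp [pvGoA, ih, h, List.filter_cons]

lemma pvGoA_true (lines : List String) :
    pvGoA lines true = split_conditional_block_py_alt lines := by
  induction lines with
  | nil => rfl
  | cons l rest ih =>
    by_cases h : pvIsElse l = true
    · simp [pvGoA, h, split_conditional_block_py_alt, List.findIdx?_cons, pvGoA_false]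
    · rw [pvGoA]
      simp only [h]
      rw [ih]
      unfold split_conditional_block_py_alt
      rw [List.findIdx?_cons]
      simp only [h]
      cases hf : List.findIdx? pvIsElse rest <;>
        simp [List.take_succ_cons, List.drop_succ_cons]

-- ===== VERDICT (by name: the statement is the Claim_ definition above) =====
theorem split_conditional_block_py_spec : Claim_equal_split_conditional_block_py := by
  intro bc _
  unfold Spec_split_conditional_block_py split_conditional_block_py
  exact pvGoA_true bc
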